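-- pv_equiv track=rewrite | github.com/SungHo3268/KoGEM | analysis/scripts/plot_human_statistics.py | make_positive_from_here
-- ===== SOURCE A (Python) =====
-- def make_positive_from_here(y, left_to_right=True):
--     if not left_to_right:
--         y = y[::-1]
--     for i in range(len(y)):
--         if y[i] > 0:
--             continue
--         else:
--             for j in range(i, len(y)):
--                 y[j] = 0
--             break
--     if not left_to_right:
--         y = y[::-1]
--     return y
-- ===== SOURCE B (Python) =====
-- def make_positive_from_here(y, left_to_right=True):
--     seq = y if left_to_right else y[::-1]
--     out = []
--     zeroing = False
--     for v in seq:
--         zeroing = zeroing or v <= 0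
--         out.append(0 if zeroing else v)
--     return out if left_to_right else out[::-1]
-- ===== Notes on version B (the rewrite author's own statement) =====
-- stated objective: simpler
-- what changed: A locates the first non-positive element with an index loop and then runs a second inner loop that overwrites the suffix in place; B is one flat pass with a boolean 'zeroing' flag that builds a fresh output list, so the find-then-fill two-phase structure disappears. Return values are identical; unlike A (which mutates its argument in place when left_to_right is True), B never mutates its argument.
import Mathlib
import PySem

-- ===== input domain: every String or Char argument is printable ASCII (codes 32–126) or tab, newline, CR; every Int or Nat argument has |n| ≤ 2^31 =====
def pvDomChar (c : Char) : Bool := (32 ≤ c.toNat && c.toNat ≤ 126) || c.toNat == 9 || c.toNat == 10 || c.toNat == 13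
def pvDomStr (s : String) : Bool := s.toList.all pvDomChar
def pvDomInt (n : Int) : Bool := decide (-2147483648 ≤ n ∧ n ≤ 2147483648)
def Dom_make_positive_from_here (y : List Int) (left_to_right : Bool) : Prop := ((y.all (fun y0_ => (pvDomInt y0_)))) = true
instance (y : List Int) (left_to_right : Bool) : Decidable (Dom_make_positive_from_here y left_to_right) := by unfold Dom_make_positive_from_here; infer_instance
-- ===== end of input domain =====

-- B replaces A's find-pivot-then-fill-suffix pair of loops with one flat pass carrying a
-- boolean flag, building a fresh list ('simpler'); return values agree everywhere.
-- Note: A mutates its argument in place when left_to_right is True, B never does; the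
-- equivalence proved here is about the RETURN value only.

-- ===== PORT A =====
-- inner loop: 'for j in range(i, len(y)): y[j] = 0'
def pvFillFrom (y : List Int) (i : Nat) : List Int :=
  (List.range' i (y.length - i)).foldl (fun acc j => acc.set j 0) y

-- outer loop: scan i, 'continue' while y[i] > 0, else fill and break
def pvFindLoop (y : List Int) (i : Nat) : List Int :=
  if h : i < y.length then
    if y[i] > 0 then pvFindLoop y (i + 1) else pvFillFrom y i
  else y
termination_by y.length - i

def make_positive_from_here (y : List Int) (left_to_right : Bool) : List Int :=
  let y1 := if !left_to_right then y.reverse else y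
  let y2 := pvFindLoop y1 0
  if !left_to_right then y2.reverse else y2

-- ===== PORT B =====
def make_positive_from_here_alt (y : List Int) (left_to_right : Bool) : List Int :=
  let seq := if left_to_right then y else y.reverse
  let out := (seq.foldl (fun (p : List Int × Bool) v =>
      let z := p.2 || decide (v ≤ 0)
      (p.1 ++ [if z then 0 else v], z)) ([], false)).1
  if left_to_right then out else out.reverse

-- ===== PRECONDITION & SPEC =====
def Spec_make_positive_from_here (y : List Int) (left_to_right : Bool) (out : List Int) : Prop := out = make_positive_from_here_alt y left_to_right
instance (y : List Int) (left_to_right : Bool) (out : List Int) : Decidable (Spec_make_positive_from_here y left_to_right out) := by unfold Spec_make_positive_from_here; infer_instance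

-- ===== CLAIM (what is proved, stated in full; the proofs are below) =====
def Claim_equal_make_positive_from_here : Prop := ∀ (y : List Int) (left_to_right : Bool), Dom_make_positive_from_here y left_to_right → Spec_make_positive_from_here y left_to_right (make_positive_from_here y left_to_right)

-- ===== LEMMAS AND PROOFS =====

-- reference recursion: what one flag-pass produces starting with flag z
def pvG (xs : List Int) (z : Bool) : List Int :=
  match xs with
  | [] => []
  | v :: t =>
    let z' := z || decide (v ≤ 0)
    (if z' then 0 else v) :: pvG t z'

theorem pvG_true (xs : List Int) : pvG xs true = List.replicate xs.length 0 := by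
  induction xs with
  | nil => rfl
  | cons v t ih => simp [pvG, ih, List.replicate]

theorem pvFoldl_eq_pvG (xs : List Int) (acc : List Int) (z : Bool) :
    (xs.foldl (fun (p : List Int × Bool) v =>
      let z := p.2 || decide (v ≤ 0)
      (p.1 ++ [if z then 0 else v], z)) (acc, z)).1 = acc ++ pvG xs z := by
  induction xs generalizing acc z with
  | nil => simp [pvG]
  | cons v t ih =>
    simp only [List.foldl_cons]
    rw [ih]
    simp [pvG]

theorem pvFillFrom_aux (n : Nat) : ∀ (y : List Int) (i : Nat), i + n = y.length →
    (List.range' i n).foldl (fun acc j => acc.set j 0) y =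
      y.take i ++ List.replicate n 0 := by
  induction n with
  | zero =>
    intro y i h
    simp [List.take_of_length_le (show y.length ≤ i by omega)]
  | succ n ih =>
    intro y i h
    have hi : i < y.length := by omega
    rw [List.range'_succ]
    simp only [List.foldl_cons]
    rw [ih (y.set i 0) (i + 1) (by simp; omega)]
    rw [List.replicate_succ, List.take_add_one, List.take_set,
      List.getElem?_set_self hi, List.set_eq_of_length_le (by simp)]
    simp

theorem pvFillFrom_eq (y : List Int) (i : Nat) (h : i ≤ y.length) :
    pvFillFrom y i = y.take i ++ List.replicate (y.length - i) 0 := by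
  unfold pvFillFrom
  exact pvFillFrom_aux (y.length - i) y i (by omega)

theorem pvFindLoop_eq (y : List Int) (i : Nat) (h : i ≤ y.length) :
    pvFindLoop y i = y.take i ++ pvG (y.drop i) false := by
  induction hn : y.length - i generalizing i with
  | zero =>
    have he : i = y.length := by omega
    subst he
    rw [pvFindLoop]
    simp [List.take_of_length_le (le_refl _), pvG]
  | succ n ih =>
    have hi : i < y.length := by omega
    rw [pvFindLoop]
    rw [dif_pos hi]
    have hd : y.drop i = y[i] :: y.drop (i + 1) := List.drop_eq_getElem_cons hi
    by_cases hpos : y[i] > 0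
    · rw [if_pos hpos, ih (i + 1) (by omega) (by omega), hd]
      have hz : (false || decide (y[i] ≤ 0)) = false := by simp; omega
      simp only [pvG]
      rw [hz]
      have ht : y.take (i + 1) = y.take i ++ [y[i]] := by
        rw [List.take_add_one]
        simp [List.getElem?_eq_getElem hi]
      rw [ht, List.append_assoc, List.singleton_append]
      simp
    · rw [if_neg hpos, pvFillFrom_eq y i (le_of_lt hi), hd]
      simp only [pvG]
      rw [show (false || decide (y[i] ≤ 0)) = true by simp; omega]
      rw [pvG_true]
      have hdl : (y.drop (i + 1)).length = n := by simp; omega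
      rw [hn, hdl, List.replicate_succ]
      simp

-- ===== VERDICT (by name: the statement is the Claim_ definition above) =====
theorem make_positive_from_here_spec : Claim_equal_make_positive_from_here := by
  intro y ltr _
  unfold Spec_make_positive_from_here make_positive_from_here make_positive_from_here_alt
  cases ltr
  · simp only [Bool.not_false, reduceIte]
    rw [pvFindLoop_eq y.reverse 0 (Nat.zero_le _), pvFoldl_eq_pvG]
    simp
  · simp only [Bool.not_true, Bool.false_eq_true, reduceIte]
    rw [pvFindLoop_eq y 0 (Nat.zero_le _), pvFoldl_eq_pvG]
    simp
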